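-- pv_equiv track=rewrite | github.com/Epoch-Mengying/Python_Learning | Python_learning/word_guessing.py | next_letter_frequencies
-- ===== SOURCE A (Python) =====
-- def next_letter_frequencies(txt):
--     # txt is a big text string
--     r = {} # initialize the accumulator, an empty ditionary
--     for i in range(len(txt)-1):
--         # loop through the positions (indexes) of txt;
--         # each iteration, we'll be looking at the
--         # letter txt[i] and the following letter, txt[i+1]
--         if txt[i] not in r:
--             # first time we've seen the current letter
--             # make an empty dictionary for counts of what letters come next
--             r[txt[i]] = {}
--         next_letter_freqs = r[txt[i]]  # dictionary of counts of what letters come next after txt[i]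
--         next_letter = txt[i+1]  # next letter is txt[i+1]
--         if next_letter not in next_letter_freqs:
--             # first time seeing next_letter after txt[i+1]
--             next_letter_freqs[next_letter] = 1
--         else:
--             next_letter_freqs[next_letter] = next_letter_freqs[next_letter] + 1
--     return r
-- ===== SOURCE B (Python) =====
-- def next_letter_frequencies(txt):
--     # group-by re-implementation: for each distinct letter (in first-occurrence
--     # order) scan the adjacent-pair list once and count its successors
--     pairs = list(zip(txt, txt[1:]))
--     r = {}
--     for a, _ in pairs:
--         if a not in r:
--             counts = {}
--             for x, y in pairs:
--                 if x == a:
--                     counts[y] = counts.get(y, 0) + 1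
--             r[a] = counts
--     return r
-- ===== Notes on version B (the rewrite author's own statement) =====
-- stated objective: alternative
-- what changed: Replaces A's single-pass hash accumulation over string positions with group-by counting: build the adjacent-pair list once, then for each distinct first letter (in first-occurrence order) scan the pair list and count its successors.
import Mathlib
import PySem

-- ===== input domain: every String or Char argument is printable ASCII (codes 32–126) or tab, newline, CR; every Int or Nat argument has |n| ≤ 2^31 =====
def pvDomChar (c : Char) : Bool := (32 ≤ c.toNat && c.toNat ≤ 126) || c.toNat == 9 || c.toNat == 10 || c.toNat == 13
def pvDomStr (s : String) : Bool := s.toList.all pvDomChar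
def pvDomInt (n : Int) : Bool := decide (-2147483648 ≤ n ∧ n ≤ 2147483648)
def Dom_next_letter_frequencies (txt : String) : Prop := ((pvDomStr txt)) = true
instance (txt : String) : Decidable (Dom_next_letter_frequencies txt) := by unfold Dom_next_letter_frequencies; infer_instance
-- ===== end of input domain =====

-- B replaces A's single-pass hash accumulation by group-by counting over the adjacent-pair
-- list (per distinct first letter, one scan of the pairs); alternative decomposition, not faster.

-- ===== PORT A =====
-- loop body of A: one iteration looking at letter c and the following letter nl
def nlfLoopBody (r : PySem.Dict String (PySem.Dict String Int)) (c nl : String) :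
    PySem.Dict String (PySem.Dict String Int) :=
  let r1 := if !(r.contains c) then r.insert c PySem.Dict.empty else r
  let nlf := r1.getD c PySem.Dict.empty       -- r[c]; the key is present here, so getD is exact
  let nlf1 := if !(nlf.contains nl) then nlf.insert nl 1
              else nlf.insert nl (nlf.getD nl 0 + 1)   -- nl is present in this branch, getD is exact
  r1.insert c nlf1                            -- Python mutates the aliased inner dict in place

def next_letter_frequencies (txt : String) : List (String × List (String × Int)) :=
  let cs : List String := txt.toList.map (fun c => String.ofList [c])  -- txt as its 1-char strings
  let r := (PySem.List.pyRange 0 (PySem.Str.len txt - 1) 1).foldl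
    (fun r i => nlfLoopBody r (PySem.List.pyGetD cs i "") (PySem.List.pyGetD cs (i + 1) ""))
    PySem.Dict.empty
  r.items.map (fun kv => (kv.1, kv.2.items))

-- ===== PORT B =====
-- inner loop of B: count the successors of letter a over the whole pair list
def nlfCount (pairs : List (String × String)) (a : String) : PySem.Dict String Int :=
  pairs.foldl (fun counts q =>
      if q.1 == a then counts.insert q.2 (counts.getD q.2 0 + 1) else counts)
    PySem.Dict.empty

def next_letter_frequencies_alt (txt : String) : List (String × List (String × Int)) :=
  let cs : List String := txt.toList.map (fun c => String.ofList [c])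
  let pairs := cs.zip (PySem.List.slice cs (some 1) none)   -- zip(txt, txt[1:])
  let r := pairs.foldl
    (fun r p => if !(r.contains p.1) then r.insert p.1 (nlfCount pairs p.1) else r)
    PySem.Dict.empty
  r.items.map (fun kv => (kv.1, kv.2.items))

-- ===== PRECONDITION & SPEC =====
def Spec_next_letter_frequencies (txt : String) (out : List (String × List (String × Int))) : Prop := out = next_letter_frequencies_alt txt
instance (txt : String) (out : List (String × List (String × Int))) : Decidable (Spec_next_letter_frequencies txt out) := by unfold Spec_next_letter_frequencies; infer_instance

-- ===== CLAIM (what is proved, stated in full; the proofs are below) =====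
def Claim_equal_next_letter_frequencies : Prop := ∀ (txt : String), Dom_next_letter_frequencies txt → Spec_next_letter_frequencies txt (next_letter_frequencies txt)

-- ===== LEMMAS AND PROOFS =====

-- A's loop body as a function of one adjacent pair
def stepP (r : PySem.Dict String (PySem.Dict String Int)) (p : String × String) :
    PySem.Dict String (PySem.Dict String Int) := nlfLoopBody r p.1 p.2

-- A's loop body collapsed to a single insert
def gA (r : PySem.Dict String (PySem.Dict String Int)) (p : String × String) :
    PySem.Dict String (PySem.Dict String Int) :=
  r.insert p.1 ((r.getD p.1 PySem.Dict.empty).insert p.2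
    ((r.getD p.1 PySem.Dict.empty).getD p.2 0 + 1))

-- B's outer loop body (ps is the full pair list B counts over)
def stepB (ps : List (String × String)) (r : PySem.Dict String (PySem.Dict String Int))
    (p : String × String) : PySem.Dict String (PySem.Dict String Int) :=
  if !(r.contains p.1) then r.insert p.1 (nlfCount ps p.1) else r

lemma stepP_eq_gA (r : PySem.Dict String (PySem.Dict String Int)) (p : String × String) :
    stepP r p = gA r p := by
  unfold stepP nlfLoopBody gA
  by_cases h : r.contains p.1
  · simp only [h, Bool.not_true, Bool.false_eq_true, if_false]
    by_cases h2 : (r.getD p.1 PySem.Dict.empty).contains p.2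
    · simp [h2]
    · have h2' : (r.getD p.1 PySem.Dict.empty).contains p.2 = false := by simpa using h2
      simp [h2', PySem.Dict.getD_of_not_contains _ _ h2']
  · have hr : r.contains p.1 = false := by simpa using h
    simp only [hr, Bool.not_false, if_true]
    rw [PySem.Dict.getD_insert_self]
    simp [PySem.Dict.contains_empty, PySem.Dict.getD_empty, PySem.Dict.insert_insert_self,
      PySem.Dict.getD_of_not_contains _ _ hr]

lemma slice_one_eq_drop (cs : List String) :
    PySem.List.slice cs (some 1) none = cs.drop 1 := by
  cases cs with
  | nil => rfl
  | cons x xs =>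
    rw [PySem.List.slice_some_none]
    simp [PySem.List.clampIdx]

lemma nlfCount_of_not_mem (ps : List (String × String)) (a : String)
    (h : a ∉ ps.map Prod.fst) : nlfCount ps a = PySem.Dict.empty := by
  induction ps with
  | nil => rfl
  | cons p ps ih =>
    simp only [List.map_cons, List.mem_cons, not_or] at h
    simp only [nlfCount, List.foldl_cons] at *
    rw [if_neg (by simpa using Ne.symm h.1)]
    exact ih h.2

lemma nlfCount_append (ps : List (String × String)) (p : String × String) (a : String) :
    nlfCount (ps ++ [p]) a =
      if p.1 == a then (nlfCount ps a).insert p.2 ((nlfCount ps a).getD p.2 0 + 1)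
      else nlfCount ps a := by
  simp only [nlfCount, List.foldl_append, List.foldl_cons, List.foldl_nil]

-- what A's accumulator looks up to after any processed pair list
lemma getA (ps : List (String × String)) (a : String) :
    (ps.foldl gA PySem.Dict.empty).get? a =
      if a ∈ ps.map Prod.fst then some (nlfCount ps a) else none := by
  induction ps using List.reverseRecOn with
  | nil => simp [PySem.Dict.get?_empty]
  | append_singleton ps p ih =>
    obtain ⟨p1, p2⟩ := p
    rw [List.foldl_append, List.foldl_cons, List.foldl_nil]
    show (gA _ (p1, p2)).get? a = _
    rw [gA, PySem.Dict.get?_insert, nlfCount_append]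
    by_cases hap : a = p1
    · subst hap
      simp only [BEq.rfl, List.map_append, List.map_cons, List.map_nil,
        List.mem_append, List.mem_cons, or_true, true_or,
        PySem.Dict.getD_eq_get?_getD, ih, if_pos]
      by_cases hmem : a ∈ ps.map Prod.fst
      · simp [hmem]
      · simp [hmem, nlfCount_of_not_mem ps a hmem, PySem.Dict.get?_empty]
    · have hb : (p1 == a) = false := by simp [Ne.symm hap]
      rw [if_neg hap, hb, ih]
      by_cases hmem : a ∈ ps.map Prod.fst
      · rw [if_pos hmem, if_pos (by simp [hmem]), if_neg (by simp)]
      · rw [if_neg hmem, if_neg (by simp [hmem, hap])]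

-- what B's accumulator looks up to, over any remaining pair list
lemma getB (ps rest : List (String × String)) (acc : PySem.Dict String (PySem.Dict String Int))
    (a : String) :
    (rest.foldl (stepB ps) acc).get? a =
      if acc.contains a then acc.get? a
      else if a ∈ rest.map Prod.fst then some (nlfCount ps a) else none := by
  induction rest generalizing acc with
  | nil =>
    simp only [List.foldl_nil, List.map_nil, List.not_mem_nil, if_false]
    by_cases h : acc.contains a
    · rw [if_pos h]
    · have h' : acc.contains a = false := by simpa using h
      rw [if_neg h, (PySem.Dict.get?_eq_none_iff_contains acc a).2 h']
  | cons p rest ih =>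
    rw [List.foldl_cons, ih]
    by_cases hc : acc.contains p.1
    · have hs : stepB ps acc p = acc := by simp [stepB, hc]
      rw [hs]
      by_cases ha : acc.contains a
      · rw [if_pos ha, if_pos ha]
      · have hane : a ≠ p.1 := fun h => ha (h ▸ hc)
        rw [if_neg ha, if_neg ha]
        by_cases hm : a ∈ List.map Prod.fst rest
        · rw [if_pos hm, if_pos (by simp [hm])]
        · rw [if_neg hm, if_neg (by simp [hm, hane])]
    · have hc' : acc.contains p.1 = false := by simpa using hc
      have hstep : stepB ps acc p = acc.insert p.1 (nlfCount ps p.1) := by simp [stepB, hc']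
      rw [hstep]
      by_cases hap : a = p.1
      · rw [if_pos (by simp [hap]), PySem.Dict.get?_insert,
          if_pos hap, if_neg (by simp [hap ▸ hc]), if_pos (by simp [hap]), hap]
      · rw [PySem.Dict.contains_insert, PySem.Dict.get?_insert, if_neg hap]
        have hb : (a == p.1) = false := by simpa using hap
        rw [hb, Bool.false_or]
        by_cases ha : acc.contains a
        · rw [if_pos ha, if_pos ha]
        · rw [if_neg ha, if_neg ha]
          by_cases hm : a ∈ List.map Prod.fst rest
          · rw [if_pos hm, if_pos (by simp [hm])]
          · rw [if_neg hm, if_neg (by simp [hm, hap])]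

lemma keysA (ps : List (String × String)) :
    (ps.foldl gA PySem.Dict.empty).keys = PySem.Set.ofList (ps.map Prod.fst) := by
  have h := PySem.Dict.keys_foldl_insert_key ps Prod.fst
    (fun (r : PySem.Dict String (PySem.Dict String Int)) (p : String × String) =>
      ((r.getD p.1 PySem.Dict.empty).insert p.2
        ((r.getD p.1 PySem.Dict.empty).getD p.2 0 + 1))) PySem.Dict.empty
  unfold gA
  exact h

lemma nodupA (ps : List (String × String)) :
    (ps.foldl gA PySem.Dict.empty).keys.Nodup := by
  rw [keysA]; exact PySem.Set.nodup_ofList _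

lemma keysB (ps rest : List (String × String))
    (acc : PySem.Dict String (PySem.Dict String Int)) :
    (rest.foldl (stepB ps) acc).keys = PySem.Set.update acc.keys (rest.map Prod.fst) := by
  induction rest generalizing acc with
  | nil => rfl
  | cons p rest ih =>
    rw [List.foldl_cons, ih, List.map_cons,
      show PySem.Set.update acc.keys (p.1 :: rest.map Prod.fst)
        = PySem.Set.update (PySem.Set.add acc.keys p.1) (rest.map Prod.fst) from rfl]
    by_cases hc : acc.contains p.1
    · have hs : stepB ps acc p = acc := by simp [stepB, hc]
      have hmem : p.1 ∈ acc.keys := (PySem.Dict.contains_iff_mem_keys acc p.1).1 hc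
      have hadd : PySem.Set.add acc.keys p.1 = acc.keys := by
        simp [PySem.Set.add, PySem.Set.contains, hmem]
      rw [hs, hadd]
    · have hc' : acc.contains p.1 = false := by simpa using hc
      have hmem : p.1 ∉ acc.keys := fun h =>
        by rw [(PySem.Dict.contains_iff_mem_keys acc p.1).2 h] at hc'; cases hc'
      have h1 : stepB ps acc p = acc.insert p.1 (nlfCount ps p.1) := by simp [stepB, hc']
      have h2 : PySem.Set.add acc.keys p.1 = acc.keys ++ [p.1] := by
        simp [PySem.Set.add, PySem.Set.contains, hmem]
      rw [h1, h2, PySem.Dict.keys_insert_of_not_contains _ _ hc']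

lemma nodupB (ps : List (String × String)) :
    (ps.foldl (stepB ps) PySem.Dict.empty).keys.Nodup := by
  rw [keysB, PySem.Dict.keys_empty,
    show PySem.Set.update ([] : PySem.Set String) (ps.map Prod.fst)
      = PySem.Set.ofList (ps.map Prod.fst) from rfl]
  exact PySem.Set.nodup_ofList _

-- the heart of the claim: A's accumulation dict equals B's group-by dict
lemma dict_eq (ps : List (String × String)) :
    ps.foldl gA PySem.Dict.empty = ps.foldl (stepB ps) PySem.Dict.empty := by
  apply PySem.Dict.ext
  rw [PySem.Dict.items_eq_map_keys _ (nodupA ps) PySem.Dict.empty,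
    PySem.Dict.items_eq_map_keys _ (nodupB ps) PySem.Dict.empty,
    keysA, keysB, PySem.Dict.keys_empty,
    show PySem.Set.update ([] : PySem.Set String) (ps.map Prod.fst)
      = PySem.Set.ofList (ps.map Prod.fst) from rfl]
  apply List.map_congr_left
  intro a _
  rw [PySem.Dict.getD_eq_get?_getD, PySem.Dict.getD_eq_get?_getD, getA, getB]
  simp [PySem.Dict.contains_empty]

-- A's index loop over txt is the fold of its body over the adjacent-pair list
lemma Aloop (cs : List String) :
    (PySem.List.pyRange 0 ((cs.length : Int) - 1) 1).foldl
      (fun r i => nlfLoopBody r (PySem.List.pyGetD cs i "") (PySem.List.pyGetD cs (i + 1) ""))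
      PySem.Dict.empty
    = (cs.zip (cs.drop 1)).foldl stepP PySem.Dict.empty := by
  by_cases hnil : cs = []
  · subst hnil
    rw [PySem.List.pyRange_one_eq_nil (by simp)]
    rfl
  · have hlen : cs.length ≠ 0 := by simpa using hnil
    have hzl : (cs.zip (cs.drop 1)).length = cs.length - 1 := by simp [List.length_zip]
    have hb : ((cs.length : Int) - 1) = ((cs.zip (cs.drop 1)).length : Int) := by
      rw [hzl]; omega
    rw [hb]
    rw [PySem.List.foldl_congr_mem (PySem.List.pyRange 0 (((cs.zip (cs.drop 1)).length : Int)) 1) _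
      (fun r i => stepP r (PySem.List.pyGetD (cs.zip (cs.drop 1)) i ("", ""))) PySem.Dict.empty ?_]
    · exact PySem.List.foldl_pyRange_zero_pyGetD' (cs.zip (cs.drop 1)) ("", "") stepP PySem.Dict.empty
    · intro acc i hi
      rw [PySem.List.mem_pyRange_one] at hi
      obtain ⟨h0, h1⟩ := hi
      have hlt : i.toNat < (cs.zip (cs.drop 1)).length := by omega
      have hcslt : i.toNat < cs.length := by omega
      have hcslt2 : i.toNat + 1 < cs.length := by omega
      have e1 : PySem.List.pyGetD cs i "" = cs[i.toNat] :=
        PySem.List.pyGetD_eq_getElem cs "" h0 (by omega)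
      have e2 : PySem.List.pyGetD cs (i + 1) "" = cs[i.toNat + 1] := by
        rw [PySem.List.pyGetD_eq_getElem cs "" (by omega) (by omega)]
        congr 1; omega
      have e3 : PySem.List.pyGetD (cs.zip (cs.drop 1)) i ("", "") = (cs.zip (cs.drop 1))[i.toNat] :=
        PySem.List.pyGetD_eq_getElem _ ("", "") h0 (by omega)
      have e4 : (cs.zip (cs.drop 1))[i.toNat]'hlt = (cs[i.toNat]'hcslt, cs[i.toNat + 1]'hcslt2) := by
        rw [List.getElem_zip]
        congr 1
        rw [List.getElem_drop]
        congr 1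
        omega
      show nlfLoopBody acc _ _ = stepP acc (PySem.List.pyGetD (cs.zip (cs.drop 1)) i ("", ""))
      rw [e1, e2, e3, e4, stepP]

-- ===== VERDICT (by name: the statement is the Claim_ definition above) =====
theorem next_letter_frequencies_spec : Claim_equal_next_letter_frequencies := by
  intro txt _
  show next_letter_frequencies txt = next_letter_frequencies_alt txt
  simp only [next_letter_frequencies, next_letter_frequencies_alt]
  rw [slice_one_eq_drop]
  have hlen : PySem.Str.len txt - 1
      = ((txt.toList.map (fun c => String.ofList [c])).length : Int) - 1 := by
    simp [PySem.Str.len_eq]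
  rw [hlen, Aloop,
    PySem.List.foldl_congr_mem _ stepP gA _ (fun acc x _ => stepP_eq_gA acc x),
    dict_eq]
  rfl
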